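-- pv_equiv track=rewrite | github.com/tobiascm/vobes-agent-vscode | .agents/skills/skill-budget-bplus-export/analyze_bplus_api.py | filter_rows
-- ===== SOURCE A (Python) =====
-- def filter_rows(data, firma=None, status=None, ea=None, projekt=None, oe=None):
--     result = data
--     if firma:
--         q = firma.lower()
--         result = [r for r in result if q in r.get('company', '').lower()]
--     if status:
--         q = status.lower()
--         result = [r for r in result if q in r.get('status', '').lower()]
--     if ea:
--         q = ea.lower()
--         result = [r for r in result if q in r.get('ea', '').lower()]
--     if projekt:
--         q = projekt.lower()
--         result = [r for r in result if q in r.get('projektfamilie', '').lower()]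
--     if oe:
--         q = oe.lower()
--         result = [r for r in result if q in r.get('org_unit', '').lower()]
--     return result
-- ===== SOURCE B (Python) =====
-- def filter_rows(data, firma=None, status=None, ea=None, projekt=None, oe=None):
--     active = [(key, q.lower())
--               for key, q in (('company', firma), ('status', status), ('ea', ea),
--                              ('projektfamilie', projekt), ('org_unit', oe))
--               if q]
--     return [r for r in data
--             if all(ql in r.get(key, '').lower() for key, ql in active)]
-- ===== Notes on version B (the rewrite author's own statement) =====
-- stated objective: simpler
-- what changed: B builds the list of active (field, lowered query) pairs once and keeps each row in a single pass iff all active predicates hold, instead of A's five sequential filtering passes over shrinking lists.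
import Mathlib
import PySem

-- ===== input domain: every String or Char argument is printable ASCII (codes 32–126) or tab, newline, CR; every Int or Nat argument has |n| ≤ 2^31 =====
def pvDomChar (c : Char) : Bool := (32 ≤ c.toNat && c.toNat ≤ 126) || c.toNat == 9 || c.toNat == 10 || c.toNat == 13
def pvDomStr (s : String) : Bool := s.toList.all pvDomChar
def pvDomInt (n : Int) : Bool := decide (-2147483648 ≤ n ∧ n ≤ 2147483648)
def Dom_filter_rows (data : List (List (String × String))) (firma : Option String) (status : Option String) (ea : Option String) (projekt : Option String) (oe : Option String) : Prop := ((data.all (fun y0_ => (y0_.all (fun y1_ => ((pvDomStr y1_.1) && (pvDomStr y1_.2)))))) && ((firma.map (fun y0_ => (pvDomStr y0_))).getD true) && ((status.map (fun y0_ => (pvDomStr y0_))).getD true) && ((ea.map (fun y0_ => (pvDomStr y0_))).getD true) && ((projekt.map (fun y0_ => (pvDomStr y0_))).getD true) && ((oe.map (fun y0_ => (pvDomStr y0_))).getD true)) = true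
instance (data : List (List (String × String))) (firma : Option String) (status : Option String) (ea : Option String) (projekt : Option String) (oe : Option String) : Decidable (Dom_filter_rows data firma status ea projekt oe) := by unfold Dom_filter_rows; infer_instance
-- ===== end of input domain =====

-- B replaces A's five sequential filtering passes with one pass testing all active predicates per row (objective: simpler).
-- ===== PORT A =====
def filter_rows (data : List (List (String × String))) (firma : Option String) (status : Option String) (ea : Option String) (projekt : Option String) (oe : Option String) : List (List (String × String)) :=
  let result := data
  let result := match firma with
    | some f => if f ≠ "" then
        let q := PySem.Str.lower f
        result.filter (fun r => PySem.Str.isIn q (PySem.Str.lower ((r.lookup "company").getD "")))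
      else result
    | none => result
  let result := match status with
    | some f => if f ≠ "" then
        let q := PySem.Str.lower f
        result.filter (fun r => PySem.Str.isIn q (PySem.Str.lower ((r.lookup "status").getD "")))
      else result
    | none => result
  let result := match ea with
    | some f => if f ≠ "" then
        let q := PySem.Str.lower f
        result.filter (fun r => PySem.Str.isIn q (PySem.Str.lower ((r.lookup "ea").getD "")))
      else result
    | none => result
  let result := match projekt with
    | some f => if f ≠ "" then
        let q := PySem.Str.lower f
        result.filter (fun r => PySem.Str.isIn q (PySem.Str.lower ((r.lookup "projektfamilie").getD "")))
      else result
    | none => result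
  let result := match oe with
    | some f => if f ≠ "" then
        let q := PySem.Str.lower f
        result.filter (fun r => PySem.Str.isIn q (PySem.Str.lower ((r.lookup "org_unit").getD "")))
      else result
    | none => result
  result

-- ===== PORT B =====
-- the active (field, lowered query) pairs, in argument order, keeping only truthy queries
def pvActive_filter_rows (firma status ea projekt oe : Option String) : List (String × String) :=
  ([("company", firma), ("status", status), ("ea", ea), ("projektfamilie", projekt), ("org_unit", oe)] :
      List (String × Option String)).filterMap
    (fun kq => match kq.2 with
      | some q => if q ≠ "" then some (kq.1, PySem.Str.lower q) else none
      | none => none)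

def filter_rows_alt (data : List (List (String × String))) (firma : Option String) (status : Option String) (ea : Option String) (projekt : Option String) (oe : Option String) : List (List (String × String)) :=
  let active := pvActive_filter_rows firma status ea projekt oe
  data.filter (fun r =>
    active.all (fun kq => PySem.Str.isIn kq.2 (PySem.Str.lower ((r.lookup kq.1).getD ""))))
-- ===== PRECONDITION & SPEC =====
def Spec_filter_rows (data : List (List (String × String))) (firma : Option String) (status : Option String) (ea : Option String) (projekt : Option String) (oe : Option String) (out : List (List (String × String))) : Prop := out = filter_rows_alt data firma status ea projekt oe
instance (data : List (List (String × String))) (firma : Option String) (status : Option String) (ea : Option String) (projekt : Option String) (oe : Option String) (out : List (List (String × String))) : Decidable (Spec_filter_rows data firma status ea projekt oe out) := by unfold Spec_filter_rows; infer_instance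

-- ===== CLAIM (what is proved, stated in full; the proofs are below) =====
def Claim_equal_filter_rows : Prop := ∀ (data : List (List (String × String))) (firma : Option String) (status : Option String) (ea : Option String) (projekt : Option String) (oe : Option String), Dom_filter_rows data firma status ea projekt oe → Spec_filter_rows data firma status ea projekt oe (filter_rows data firma status ea projekt oe)

-- ===== LEMMAS AND PROOFS =====

-- ===== VERDICT (by name: the statement is the Claim_ definition above) =====

set_option maxHeartbeats 2000000 in
theorem filter_rows_spec : Claim_equal_filter_rows := by
  intro data firma status ea projekt oe _
  unfold Spec_filter_rows filter_rows filter_rows_alt pvActive_filter_rows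
  rcases firma with _ | f <;> rcases status with _ | s <;> rcases ea with _ | e <;>
    rcases projekt with _ | p <;> rcases oe with _ | o <;>
    simp only [List.filterMap] <;> (try split_ifs) <;>
    simp [List.filter_filter, List.all_cons, Bool.and_assoc, Bool.and_comm, Bool.and_left_comm]
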